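-- pv_equiv track=rewrite | github.com/curtcox/Viewer | alias_routing.py | _substitute_star_placeholders
-- ===== SOURCE A (Python) =====
-- from typing import Any, Generator, Iterable, Optional
--
-- def _substitute_star_placeholders(target: str, replacements: Iterable[str]) -> str:
--     """Return the target string with '*' placeholders replaced."""
--
--     iterator = iter(replacements)
--     result: list[str] = []
--     index = 0
--     length = len(target)
--
--     while index < length:
--         char = target[index]
--         if char == "\\":
--             if index + 1 < length and target[index + 1] == "*":
--                 result.append("*")
--                 index += 2
--                 continue
--             result.append("\\")
--             index += 1
--             continue
--         if char == "*":
--             replacement = next(iterator, "*")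
--             result.append(replacement)
--             index += 1
--             continue
--         result.append(char)
--         index += 1
--
--     return "".join(result)
-- ===== SOURCE B (Python) =====
-- def _substitute_star_placeholders(target, replacements):
--     """Return the target string with '*' placeholders replaced."""
--     iterator = iter(replacements)
--     out = []
--     rest = target
--     while rest:
--         chunk, sep, rest = rest.partition('*')
--         if not sep:
--             out.append(chunk)
--         elif chunk.endswith('\\'):
--             out.append(chunk[:-1] + '*')
--         else:
--             out.append(chunk + next(iterator, '*'))
--     return ''.join(out)
-- ===== Notes on version B (the rewrite author's own statement) =====
-- stated objective: faster
-- what changed: Replaces A's per-character index loop with a chunk-hopping scan driven by str.partition('*'): each step jumps straight to the next star, an escaped star is detected as the chunk ending in a backslash, so no per-character Python-level branching or index arithmetic remains.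
import Mathlib
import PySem

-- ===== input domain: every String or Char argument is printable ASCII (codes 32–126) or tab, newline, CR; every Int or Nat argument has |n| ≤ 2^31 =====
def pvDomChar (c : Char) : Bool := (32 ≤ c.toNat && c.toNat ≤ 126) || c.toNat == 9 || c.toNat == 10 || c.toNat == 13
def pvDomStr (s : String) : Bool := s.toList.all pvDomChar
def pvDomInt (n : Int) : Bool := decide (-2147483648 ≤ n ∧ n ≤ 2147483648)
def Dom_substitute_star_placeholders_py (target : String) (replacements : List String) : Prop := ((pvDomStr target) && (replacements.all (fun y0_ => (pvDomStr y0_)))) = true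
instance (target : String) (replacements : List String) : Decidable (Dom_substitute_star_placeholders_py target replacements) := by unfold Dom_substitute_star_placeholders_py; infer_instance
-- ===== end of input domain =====

-- B replaces A's per-character index loop with a chunk-hopping scan driven by
-- str.partition('*') (alternative decomposition; same asymptotic cost).


-- ===== PORT A =====
-- A's while loop over the character index, transliterated as structural recursion over
-- the character list; `reps` is the state of `iterator` (next(it, "*") = head-or-"*"),
-- the returned list is `result`, joined with "" at the end.
def pvSubstLoopA : List Char → List String → List String
  | [], _ => []
  | c :: rest, reps =>
    if c = '\\' then
      match rest with
      | '*' :: rest2 => "*" :: pvSubstLoopA rest2 reps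
      | other => "\\" :: pvSubstLoopA other reps
    else if c = '*' then
      match reps with
      | r :: rs => r :: pvSubstLoopA rest rs
      | [] => "*" :: pvSubstLoopA rest []
    else String.ofList [c] :: pvSubstLoopA rest reps
termination_by cs _ => cs.length
decreasing_by all_goals (simp_all; try omega)

def substitute_star_placeholders_py (target : String) (replacements : List String) : String :=
  PySem.Str.join "" (pvSubstLoopA target.toList replacements)

-- ===== PORT B =====
-- hand port of str.partition('*') (no PySem primitive): returns the chunk before the
-- first '*' and `some rest` iff a '*' was found (exact for this single-char separator;
-- Python's middle triple component is encoded by the Option).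
def pvPartStar : List Char → List Char × Option (List Char)
  | [] => ([], none)
  | c :: rest =>
    if c = '*' then ([], some rest)
    else
      let p := pvPartStar rest
      (c :: p.1, p.2)

-- B's `while rest:` loop; fuel > number of remaining characters makes the loop a
-- total recursion (each iteration that finds a '*' consumes at least one character,
-- an iteration without one is the last); the branches mirror Source B's loop body.
def pvSubstLoopB : Nat → List Char → List String → List (List Char)
  | _, [], _ => []
  | 0, _, _ => []
  | fuel + 1, cs, reps =>
    match pvPartStar cs with
    | (chunk, none) => [chunk]
    | (chunk, some rest) =>
      if chunk.getLast? = some '\\' then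
        (chunk.dropLast ++ ['*']) :: pvSubstLoopB fuel rest reps
      else
        match reps with
        | r :: rs => (chunk ++ r.toList) :: pvSubstLoopB fuel rest rs
        | [] => (chunk ++ ['*']) :: pvSubstLoopB fuel rest []

def substitute_star_placeholders_py_alt (target : String) (replacements : List String) : String :=
  String.ofList (pvSubstLoopB (target.toList.length + 1) target.toList replacements).flatten

-- ===== PRECONDITION & SPEC =====
def Spec_substitute_star_placeholders_py (target : String) (replacements : List String) (out : String) : Prop := out = substitute_star_placeholders_py_alt target replacements
instance (target : String) (replacements : List String) (out : String) : Decidable (Spec_substitute_star_placeholders_py target replacements out) := by unfold Spec_substitute_star_placeholders_py; infer_instance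

-- ===== CLAIM (what is proved, stated in full; the proofs are below) =====
def Claim_equal_substitute_star_placeholders_py : Prop := ∀ (target : String) (replacements : List String), Dom_substitute_star_placeholders_py target replacements → Spec_substitute_star_placeholders_py target replacements (substitute_star_placeholders_py target replacements)

-- ===== LEMMAS AND PROOFS =====

-- rewriting equations for A's loop
theorem pvSubstLoopA_cons (c : Char) (rest : List Char) (reps : List String) :
    pvSubstLoopA (c :: rest) reps =
      if c = '\\' then
        match rest with
        | '*' :: rest2 => "*" :: pvSubstLoopA rest2 reps
        | other => "\\" :: pvSubstLoopA other reps
      else if c = '*' then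
        match reps with
        | r :: rs => r :: pvSubstLoopA rest rs
        | [] => "*" :: pvSubstLoopA rest []
      else String.ofList [c] :: pvSubstLoopA rest reps := by
  rw [pvSubstLoopA.eq_def]

theorem pvSubstLoopA_nil (reps : List String) : pvSubstLoopA [] reps = [] := by
  rw [pvSubstLoopA.eq_def]

theorem pvSubstLoopA_esc (rest2 : List Char) (reps : List String) :
    pvSubstLoopA ('\\' :: '*' :: rest2) reps = "*" :: pvSubstLoopA rest2 reps := by
  rw [pvSubstLoopA_cons]; rfl

theorem pvSubstLoopA_backslash (rest : List Char) (reps : List String)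
    (h : rest.head? ≠ some '*') :
    pvSubstLoopA ('\\' :: rest) reps = "\\" :: pvSubstLoopA rest reps := by
  rw [pvSubstLoopA_cons]
  split
  · split
    · simp at h
    · rfl
  · rename_i hc; exact absurd rfl hc

theorem pvSubstLoopA_star_nil (rest : List Char) :
    pvSubstLoopA ('*' :: rest) [] = "*" :: pvSubstLoopA rest [] := by
  rw [pvSubstLoopA_cons]; rfl

theorem pvSubstLoopA_star_cons (rest : List Char) (r : String) (rs : List String) :
    pvSubstLoopA ('*' :: rest) (r :: rs) = r :: pvSubstLoopA rest rs := by
  rw [pvSubstLoopA_cons]; rfl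

theorem pvSubstLoopA_char (c : Char) (rest : List Char) (reps : List String)
    (h1 : c ≠ '\\') (h2 : c ≠ '*') :
    pvSubstLoopA (c :: rest) reps = String.ofList [c] :: pvSubstLoopA rest reps := by
  rw [pvSubstLoopA_cons, if_neg h1, if_neg h2]

-- equations and characterisation for B's loop and pvPartStar
theorem pvSubstLoopB_nil (f : Nat) (reps : List String) : pvSubstLoopB f [] reps = [] := by
  cases f <;> rfl

theorem pvSubstLoopB_succ (g : Nat) (c : Char) (cs : List Char) (reps : List String) :
    pvSubstLoopB (g + 1) (c :: cs) reps =
      (match pvPartStar (c :: cs) with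
       | (chunk, none) => [chunk]
       | (chunk, some rest) =>
         if chunk.getLast? = some '\\' then
           (chunk.dropLast ++ ['*']) :: pvSubstLoopB g rest reps
         else
           match reps with
           | r :: rs => (chunk ++ r.toList) :: pvSubstLoopB g rest rs
           | [] => (chunk ++ ['*']) :: pvSubstLoopB g rest []) := by
  rfl

theorem pvPartStar_none {cs chunk : List Char}
    (h : pvPartStar cs = (chunk, none)) : chunk = cs := by
  induction cs generalizing chunk with
  | nil => simp [pvPartStar] at h; simp [h]
  | cons c rest ih =>
    by_cases hc : c = '*'
    · simp [pvPartStar, hc] at h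
    · cases hrec : pvPartStar rest with
      | mk a o =>
        rw [pvPartStar] at h
        simp [hc, hrec] at h
        obtain ⟨h1, h2⟩ := h
        subst h1
        have := ih (chunk := a) (by rw [hrec, h2])
        rw [this]

theorem pvPartStar_some {cs chunk rest : List Char}
    (h : pvPartStar cs = (chunk, some rest)) :
    cs = chunk ++ '*' :: rest := by
  induction cs generalizing chunk rest with
  | nil => simp [pvPartStar] at h
  | cons c cs' ih =>
    by_cases hc : c = '*'
    · rw [pvPartStar] at h
      simp [hc] at h
      obtain ⟨h1, h2⟩ := h
      subst h1; subst h2; simp [hc]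
    · cases hrec : pvPartStar cs' with
      | mk a o =>
        rw [pvPartStar] at h
        simp [hc, hrec] at h
        obtain ⟨h1, h2⟩ := h
        subst h1
        have := ih (chunk := a) (rest := rest) (by rw [hrec, h2])
        rw [List.cons_append, ← this]

theorem pvPartStar_some_len {cs chunk rest : List Char}
    (h : pvPartStar cs = (chunk, some rest)) : rest.length < cs.length := by
  have := pvPartStar_some h
  subst this; simp; omega

theorem pvPartStar_cons_of_ne {c : Char} (cs : List Char) (hc : c ≠ '*') :
    pvPartStar (c :: cs) = (c :: (pvPartStar cs).1, (pvPartStar cs).2) := by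
  rw [pvPartStar]
  simp [hc]

theorem pvSubstLoopB_fuel : ∀ (n : Nat) (cs : List Char) (f1 f2 : Nat) (reps : List String),
    cs.length ≤ n → cs.length < f1 → cs.length < f2 →
    pvSubstLoopB f1 cs reps = pvSubstLoopB f2 cs reps := by
  intro n
  induction n with
  | zero =>
    intro cs f1 f2 reps hn h1 h2
    have : cs = [] := List.length_eq_zero_iff.mp (Nat.le_zero.mp hn)
    subst this
    rw [pvSubstLoopB_nil, pvSubstLoopB_nil]
  | succ n ih =>
    intro cs f1 f2 reps hn h1 h2
    cases cs with
    | nil => rw [pvSubstLoopB_nil, pvSubstLoopB_nil]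
    | cons c cs' =>
      cases f1 with
      | zero => simp at h1
      | succ g1 =>
        cases f2 with
        | zero => simp at h2
        | succ g2 =>
          rw [pvSubstLoopB_succ, pvSubstLoopB_succ]
          cases hp : pvPartStar (c :: cs') with
          | mk chunk o =>
            cases o with
            | none => rfl
            | some rest =>
              have hl : rest.length < (c :: cs').length := pvPartStar_some_len hp
              simp only []
              have hrw : ∀ reps', pvSubstLoopB g1 rest reps' = pvSubstLoopB g2 rest reps' := by
                intro reps'
                exact ih rest g1 g2 reps' (by simp at hl hn ⊢; omega)
                  (by simp at hl h1 ⊢; omega) (by simp at hl h2 ⊢; omega)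
              split_ifs with hg
              · rw [hrw]
              · cases reps with
                | nil =>
                  show (chunk ++ ['*']) :: pvSubstLoopB g1 rest [] =
                    (chunk ++ ['*']) :: pvSubstLoopB g2 rest []
                  rw [hrw]
                | cons r rs =>
                  show (chunk ++ r.toList) :: pvSubstLoopB g1 rest rs =
                    (chunk ++ r.toList) :: pvSubstLoopB g2 rest rs
                  rw [hrw]

theorem pvSubstLoopB_flat_cons (c : Char) (rest : List Char) (reps : List String)
    (f f' : Nat) (hf : (c :: rest).length < f) (hf' : rest.length < f')
    (hc : c ≠ '*') (h : ¬ (c = '\\' ∧ rest.head? = some '*')) :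
    (pvSubstLoopB f (c :: rest) reps).flatten = c :: (pvSubstLoopB f' rest reps).flatten := by
  cases f with
  | zero => simp at hf
  | succ g =>
  cases hp : pvPartStar rest with
  | mk chunk o =>
  have hpc : pvPartStar (c :: rest) = (c :: chunk, o) := by
    rw [pvPartStar_cons_of_ne rest hc, hp]
  cases o with
  | none =>
    have e1 : chunk = rest := pvPartStar_none hp
    subst e1
    rw [pvSubstLoopB_succ]
    simp only [hpc]
    cases chunk with
    | nil => rw [pvSubstLoopB_nil]; rfl
    | cons d ds =>
      cases f' with
      | zero => simp at hf'
      | succ g' =>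
        rw [pvSubstLoopB_succ]
        simp only [hp]
        simp
  | some rest2 =>
    have e1 := pvPartStar_some hp
    have hl2 : rest2.length < rest.length := pvPartStar_some_len hp
    cases f' with
    | zero => simp at hf'
    | succ g' =>
    have hfuel : ∀ reps', pvSubstLoopB g rest2 reps' = pvSubstLoopB g' rest2 reps' := by
      intro reps'
      exact pvSubstLoopB_fuel rest2.length rest2 g g' reps' le_rfl
        (by simp at hf; omega) (by simp at hf'; omega)
    subst e1
    cases chunk with
    | nil =>
      simp only [List.nil_append] at hp hpc h hf' ⊢
      have hcb : c ≠ '\\' := by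
        intro hceq
        exact h ⟨hceq, rfl⟩
      rw [pvSubstLoopB_succ, pvSubstLoopB_succ]
      simp only [hpc, hp]
      rw [if_neg (by simp [hcb] : ¬ ([c] : List Char).getLast? = some '\\'),
          if_neg (by simp : ¬ ([] : List Char).getLast? = some '\\')]
      cases reps with
      | nil => simp [hfuel]
      | cons r rs => simp [hfuel]
    | cons d ds =>
      simp only [List.cons_append] at hp hpc h hf' ⊢
      rw [pvSubstLoopB_succ, pvSubstLoopB_succ]
      simp only [hpc, hp]
      rw [show (c :: d :: ds).getLast? = (d :: ds).getLast? from List.getLast?_cons_cons ..]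
      split_ifs with hg
      · simp [hfuel, List.dropLast_cons_of_ne_nil]
      · cases reps with
        | nil => simp [hfuel]
        | cons r rs => simp [hfuel]

theorem pvLoop_eq : ∀ (n : Nat) (cs : List Char) (reps : List String) (f : Nat),
    cs.length ≤ n → cs.length < f →
    (pvSubstLoopA cs reps).flatMap String.toList = (pvSubstLoopB f cs reps).flatten := by
  intro n
  induction n with
  | zero =>
    intro cs reps f hn hf
    have : cs = [] := List.length_eq_zero_iff.mp (Nat.le_zero.mp hn)
    subst this
    rw [pvSubstLoopA_nil, pvSubstLoopB_nil]; rfl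
  | succ n ih =>
    intro cs reps f hn hf
    cases cs with
    | nil => rw [pvSubstLoopA_nil, pvSubstLoopB_nil]; rfl
    | cons c rest =>
      by_cases hs : c = '*'
      · subst hs
        cases f with
        | zero => simp at hf
        | succ g =>
          have hpc : pvPartStar ('*' :: rest) = ([], some rest) := by
            rw [pvPartStar]; simp
          rw [pvSubstLoopB_succ]
          simp only [hpc]
          rw [if_neg (by simp : ¬ ([] : List Char).getLast? = some '\\')]
          cases reps with
          | nil =>
            rw [pvSubstLoopA_star_nil, List.flatMap_cons,
              ih rest [] g (by simp at hn ⊢; omega) (by simp at hf ⊢; omega)]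
            simp
          | cons r rs =>
            rw [pvSubstLoopA_star_cons, List.flatMap_cons,
              ih rest rs g (by simp at hn ⊢; omega) (by simp at hf ⊢; omega)]
            simp
      · by_cases hbs : c = '\\' ∧ rest.head? = some '*'
        · obtain ⟨hb, hstar⟩ := hbs
          subst hb
          cases rest with
          | nil => simp at hstar
          | cons d rest2 =>
            have hd : d = '*' := by simpa using hstar
            subst hd
            cases f with
            | zero => simp at hf
            | succ g =>
              have hpc : pvPartStar ('\\' :: '*' :: rest2) = (['\\'], some rest2) := by
                rw [pvPartStar_cons_of_ne _ (by decide), pvPartStar]; simp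
              rw [pvSubstLoopB_succ]
              simp only [hpc]
              rw [if_pos (by simp)]
              rw [pvSubstLoopA_esc, List.flatMap_cons,
                ih rest2 reps g (by simp at hn ⊢; omega) (by simp at hf ⊢; omega)]
              simp
        · have hA : ∃ s : String, s.toList = [c] ∧
              pvSubstLoopA (c :: rest) reps = s :: pvSubstLoopA rest reps := by
            by_cases hb : c = '\\'
            · subst hb
              refine ⟨"\\", by decide, ?_⟩
              exact pvSubstLoopA_backslash rest reps (fun hh => hbs ⟨rfl, hh⟩)
            · exact ⟨String.ofList [c], by simp, pvSubstLoopA_char c rest reps hb hs⟩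
          obtain ⟨s, hsl, hA⟩ := hA
          rw [hA, List.flatMap_cons, hsl,
            pvSubstLoopB_flat_cons c rest reps f (rest.length + 1) hf (by omega) hs hbs,
            ih rest reps (rest.length + 1) (by simp at hn ⊢; omega) (by omega)]
          rfl

theorem pvJoin_nil_flatten (ps : List (List Char)) :
    PySem.Chars.join [] ps = ps.flatten := by
  induction ps with
  | nil => rfl
  | cons p ps ih =>
    cases ps with
    | nil => simp [PySem.Chars.join, List.intercalate]
    | cons q qs =>
      simp [PySem.Chars.join, List.intercalate, List.intersperse] at ih ⊢
      exact ih

-- ===== VERDICT (by name: the statement is the Claim_ definition above) =====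
theorem substitute_star_placeholders_py_spec : Claim_equal_substitute_star_placeholders_py := by
  intro target replacements _
  show substitute_star_placeholders_py target replacements = substitute_star_placeholders_py_alt target replacements
  rw [substitute_star_placeholders_py, substitute_star_placeholders_py_alt]
  rw [← String.toList_inj, PySem.Str.toList_join, String.toList_ofList, pvJoin_nil_flatten,
    ← List.flatMap_def,
    pvLoop_eq target.toList.length target.toList replacements (target.toList.length + 1) le_rfl (by omega)]
  rw [String.toList_ofList]
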